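-- pv_equiv track=rewrite | github.com/jw9603/Python | 알고리즘/BFS:DFS/9205.py | can_reach_festival
-- ===== SOURCE A (Python) =====
-- from collections import deque
--
-- def can_reach_festival(n, house, stores, festival):
--     queue = deque([house])
--     visited = set()
--
--     while queue:
--         cur_x, cur_y = queue.popleft()
--         if abs(cur_x - festival[0]) + abs(cur_y - festival[1]) <= 1000:
--             return "happy"
--
--         for i in range(n):
--             if i not in visited:
--                 next_x, next_y = stores[i]
--                 if abs(cur_x - next_x) + abs(cur_y - next_y) <= 1000:
--                     visited.add(i)
--                     queue.append((next_x, next_y))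
--
--     return "sad"
-- ===== SOURCE B (Python) =====
-- def can_reach_festival(n, house, stores, festival):
--     # Saturation: grow the reachable point set until a full pass adds nothing,
--     # then test whether any reachable point is within 1000 of the festival.
--     pts = [house]
--     rest = stores[:max(n, 0)]
--     while True:
--         still = []
--         for p in rest:
--             if any(abs(p[0] - q[0]) + abs(p[1] - q[1]) <= 1000 for q in pts):
--                 pts.append(p)
--             else:
--                 still.append(p)
--         if len(still) == len(rest):
--             break
--         rest = still
--     return "happy" if any(abs(p[0] - festival[0]) + abs(p[1] - festival[1]) <= 1000 for p in pts) else "sad"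
-- ===== Notes on version B (the rewrite author's own statement) =====
-- stated objective: alternative
-- what changed: Replaces A's BFS (deque of points plus a visited-index set, rescanning all store indices per popped point) by a worklist saturation: repeated passes move stores adjacent to the growing component from 'rest' into 'pts' until a pass adds nothing, then one final scan tests the festival.
-- outside the precondition, e.g. on can_reach_festival(2, (0, 0), [(100, 100)], (5000, 5000)): A raises IndexError, B returns 'sad'
import Mathlib
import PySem

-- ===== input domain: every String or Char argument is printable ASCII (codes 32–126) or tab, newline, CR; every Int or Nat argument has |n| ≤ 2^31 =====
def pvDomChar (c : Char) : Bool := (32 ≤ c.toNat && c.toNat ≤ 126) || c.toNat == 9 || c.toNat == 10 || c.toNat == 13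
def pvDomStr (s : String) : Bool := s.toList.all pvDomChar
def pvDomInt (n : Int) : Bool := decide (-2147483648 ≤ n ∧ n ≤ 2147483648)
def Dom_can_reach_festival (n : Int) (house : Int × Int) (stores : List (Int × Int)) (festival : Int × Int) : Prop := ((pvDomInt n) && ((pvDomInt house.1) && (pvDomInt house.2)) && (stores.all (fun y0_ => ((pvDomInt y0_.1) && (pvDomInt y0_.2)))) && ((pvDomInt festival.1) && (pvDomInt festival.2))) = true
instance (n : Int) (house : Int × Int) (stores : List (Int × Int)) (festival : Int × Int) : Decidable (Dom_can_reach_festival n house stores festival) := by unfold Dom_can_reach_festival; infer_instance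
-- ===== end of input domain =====

-- B replaces A's BFS queue + visited-index set by a worklist saturation over the store
-- points themselves (repeat passes that move reachable points into the component until a
-- pass adds nothing); objective: alternative decomposition, same asymptotic cost.

-- ===== PORT A =====

-- Manhattan distance, shared arithmetic helper of both ports
def pvMd (p q : Int × Int) : Int := |p.1 - q.1| + |p.2 - q.2|

-- stores[i]; the .getD (0,0) is reached only where Python raises IndexError (excluded by Pre_)
def pvG (stores : List (Int × Int)) (i : Int) : Int × Int := PySem.List.pyGetD stores i (0, 0)

-- body of A's `for i in range(n)` loop; state = (visited, new queue entries)
def pvInnerStep (stores : List (Int × Int)) (cur : Int × Int)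
    (st : PySem.Set Int × List (Int × Int)) (i : Int) : PySem.Set Int × List (Int × Int) :=
  if st.1.contains i then st
  else
    let p := pvG stores i
    if pvMd cur p ≤ 1000 then (st.1.add i, st.2 ++ [p]) else st

-- A's inner for-loop over range(n)
def pvInner (n : Int) (stores : List (Int × Int)) (cur : Int × Int)
    (visited : PySem.Set Int) : PySem.Set Int × List (Int × Int) :=
  (PySem.List.pyRange 0 n).foldl (pvInnerStep stores cur) (visited, [])

-- number of unvisited indices, for A's termination measure only
def pvUnvis (n : Int) (v : PySem.Set Int) : Nat :=
  (PySem.List.pyRange 0 n).countP (fun i => !(v.contains i))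

theorem pvContains_add (s : PySem.Set Int) (x j : Int) :
    (s.add x).contains j = true ↔ (s.contains j = true ∨ j = x) := by
  simp [PySem.Set.mem_add]

-- the inner loop only ever grows the visited set
theorem pvInner_mono (stores : List (Int × Int)) (cur : Int × Int) (L : List Int) :
    ∀ (v : PySem.Set Int) (acc : List (Int × Int)) (j : Int), v.contains j = true →
      (L.foldl (pvInnerStep stores cur) (v, acc)).1.contains j = true := by
  induction L with
  | nil => intro v acc j h; simpa using h
  | cons i L ih =>
    intro v acc j h
    simp only [List.foldl_cons, pvInnerStep]
    by_cases hc : v.contains i = true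
    · rw [if_pos hc]; exact ih v acc j h
    · rw [if_neg hc]
      split
      · exact ih _ _ j (by rw [pvContains_add]; exact Or.inl h)
      · exact ih v acc j h

-- termination bookkeeping for pvBfs (cited in decreasing_by)
theorem pvInner_meas (stores : List (Int × Int)) (cur : Int × Int) (L : List Int) :
    ∀ (v : PySem.Set Int) (acc : List (Int × Int)),
      (L.foldl (pvInnerStep stores cur) (v, acc)).2.length
        + L.countP (fun i => !((L.foldl (pvInnerStep stores cur) (v, acc)).1.contains i))
      ≤ acc.length + L.countP (fun i => !(v.contains i)) := by
  induction L with
  | nil => intro v acc; simp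
  | cons i L ih =>
    intro v acc
    simp only [List.foldl_cons, pvInnerStep, List.countP_cons]
    by_cases hc : v.contains i = true
    · rw [if_pos hc]
      have h := ih v acc
      have hm := pvInner_mono stores cur L v acc i hc
      simp only [hm, hc, Bool.not_true, Bool.false_eq_true, if_false]
      omega
    · rw [if_neg hc]
      split
      · have h := ih (v.add i) (acc ++ [pvG stores i])
        have hm := pvInner_mono stores cur L (v.add i) (acc ++ [pvG stores i]) i
          (by rw [pvContains_add]; exact Or.inr rfl)
        have hcf : v.contains i = false := by revert hc; cases v.contains i <;> simp
        have hcnt : L.countP (fun k => !((v.add i).contains k)) ≤ L.countP (fun k => !(v.contains k)) := by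
          refine List.countP_mono_left ?_
          intro a _ ha
          cases h2 : v.contains a with
          | false => simp
          | true => rw [(pvContains_add v i a).mpr (Or.inl h2)] at ha; simp at ha
        simp only [hm, hcf, Bool.not_true, Bool.not_false, Bool.false_eq_true, if_false, if_true,
          List.length_append, List.length_cons, List.length_nil] at h ⊢
        omega
      · have h := ih v acc
        have hcf : v.contains i = false := by revert hc; cases v.contains i <;> simp
        have h4 : (if (!((L.foldl (pvInnerStep stores cur) (v, acc)).1.contains i)) = true then 1 else 0) ≤ 1 := by
          split <;> omega
        have h5 : (!(v.contains i)) = true := by rw [hcf]; rfl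
        rw [if_pos h5]
        omega

-- A's BFS while-loop (queue = deque, processed left to right; appends at the right)
def pvBfs (n : Int) (stores : List (Int × Int)) (festival : Int × Int) :
    List (Int × Int) → PySem.Set Int → String
  | [], _ => "sad"
  | cur :: rest, visited =>
    if pvMd cur festival ≤ 1000 then "happy"
    else
      let st := pvInner n stores cur visited
      pvBfs n stores festival (rest ++ st.2) st.1
termination_by queue visited => queue.length + 2 * pvUnvis n visited
decreasing_by
  have h := pvInner_meas stores cur (PySem.List.pyRange 0 n) visited []
  simp only [pvInner, pvUnvis, List.length_append, List.length_cons, List.length_nil] at *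
  omega

def can_reach_festival (n : Int) (house : Int × Int) (stores : List (Int × Int)) (festival : Int × Int) : String :=
  pvBfs n stores festival [house] PySem.Set.empty

-- ===== PORT B =====

-- body of B's `for p in rest` pass; state = (pts, still)
def pvPassStep (st : List (Int × Int) × List (Int × Int)) (p : Int × Int) :
    List (Int × Int) × List (Int × Int) :=
  if st.1.any (fun q => pvMd p q ≤ 1000) then (st.1 ++ [p], st.2) else (st.1, st.2 ++ [p])

-- one full pass of B over rest, starting from pts (still accumulates in order)
def pvPass (pts rest : List (Int × Int)) : List (Int × Int) × List (Int × Int) :=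
  rest.foldl pvPassStep (pts, [])

-- termination bookkeeping for pvSat (cited in decreasing_by)
theorem pvPass_len (rest : List (Int × Int)) : ∀ (pts acc : List (Int × Int)),
    (rest.foldl pvPassStep (pts, acc)).2.length ≤ acc.length + rest.length := by
  induction rest with
  | nil => simp
  | cons p rest ih =>
    intro pts acc
    simp only [List.foldl_cons, pvPassStep]
    split
    · exact le_trans (ih _ _) (by simp only [List.length_cons]; omega)
    · show (rest.foldl pvPassStep (pts, acc ++ [p])).2.length ≤ acc.length + (p :: rest).length
      have h := ih pts (acc ++ [p])
      simp only [List.length_append, List.length_cons, List.length_nil] at h ⊢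
      omega

-- B's `while True` saturation loop
def pvSat (pts rest : List (Int × Int)) : List (Int × Int) :=
  let st := pvPass pts rest
  if st.2.length = rest.length then st.1 else pvSat st.1 st.2
termination_by rest.length
decreasing_by
  have h := pvPass_len rest pts []
  simp only [st, pvPass, List.length_nil, Nat.zero_add] at *
  omega

def can_reach_festival_alt (n : Int) (house : Int × Int) (stores : List (Int × Int)) (festival : Int × Int) : String :=
  let pts := pvSat [house] (PySem.List.slice stores none (some (max n 0)))
  if pts.any (fun p => pvMd p festival ≤ 1000) then "happy" else "sad"

-- ===== PRECONDITION & SPEC =====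
-- Pre_ excludes exactly the inputs where A raises IndexError: n > len(stores) and the BFS
-- reaches the store loop (i.e. the house is not already within 1000 of the festival).
def Pre_can_reach_festival (n : Int) (house : Int × Int) (stores : List (Int × Int)) (festival : Int × Int) : Prop :=
  n ≤ (stores.length : Int) ∨ |house.1 - festival.1| + |house.2 - festival.2| ≤ 1000
instance (n : Int) (house : Int × Int) (stores : List (Int × Int)) (festival : Int × Int) : Decidable (Pre_can_reach_festival n house stores festival) := by unfold Pre_can_reach_festival; infer_instance

def pvWitness_can_reach_festival : Int × (Int × Int) × (List (Int × Int)) × (Int × Int) :=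
  (1, (0, 0), [(500, 0)], (1500, 0))

def Spec_can_reach_festival (n : Int) (house : Int × Int) (stores : List (Int × Int)) (festival : Int × Int) (out : String) : Prop := out = can_reach_festival_alt n house stores festival
instance (n : Int) (house : Int × Int) (stores : List (Int × Int)) (festival : Int × Int) (out : String) : Decidable (Spec_can_reach_festival n house stores festival out) := by unfold Spec_can_reach_festival; infer_instance

-- ===== CLAIM (what is proved, stated in full; the proofs are below) =====
def Claim_equal_can_reach_festival : Prop := ∀ (n : Int) (house : Int × Int) (stores : List (Int × Int)) (festival : Int × Int), Dom_can_reach_festival n house stores festival → Pre_can_reach_festival n house stores festival → Spec_can_reach_festival n house stores festival (can_reach_festival n house stores festival)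

-- ===== LEMMAS AND PROOFS =====

theorem pvMd_comm (p q : Int × Int) : pvMd p q = pvMd q p := by
  simp [pvMd, abs_sub_comm]

-- points reachable from `queue` through stores with index in [0,n) outside `visited`
inductive pvRF (n : Int) (stores : List (Int × Int)) (queue : List (Int × Int))
    (visited : PySem.Set Int) : (Int × Int) → Prop
  | base (p : Int × Int) : p ∈ queue → pvRF n stores queue visited p
  | step (p : Int × Int) (i : Int) : pvRF n stores queue visited p → 0 ≤ i → i < n →
      visited.contains i = false → pvMd p (pvG stores i) ≤ 1000 →
      pvRF n stores queue visited (pvG stores i)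

theorem pvRF_nil (n : Int) (stores : List (Int × Int)) (visited : PySem.Set Int)
    (p : Int × Int) (h : pvRF n stores [] visited p) : False := by
  induction h with
  | base _ hm => simp at hm
  | step _ _ _ _ _ _ _ ih => exact ih

-- full characterisation of A's inner loop fold
theorem pvInner_char (stores : List (Int × Int)) (cur : Int × Int) (L : List Int) :
    ∀ (v : PySem.Set Int) (acc : List (Int × Int)),
      (∀ x, x ∈ acc → x ∈ (L.foldl (pvInnerStep stores cur) (v, acc)).2) ∧
      (∀ j, (L.foldl (pvInnerStep stores cur) (v, acc)).1.contains j = true ↔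
        (v.contains j = true ∨ (j ∈ L ∧ pvMd cur (pvG stores j) ≤ 1000))) ∧
      (∀ j, j ∈ L → v.contains j = false → pvMd cur (pvG stores j) ≤ 1000 →
        pvG stores j ∈ (L.foldl (pvInnerStep stores cur) (v, acc)).2) ∧
      (∀ x, x ∈ (L.foldl (pvInnerStep stores cur) (v, acc)).2 →
        x ∈ acc ∨ ∃ j, j ∈ L ∧ pvG stores j = x ∧ pvMd cur (pvG stores j) ≤ 1000) := by
  induction L with
  | nil =>
    intro v acc
    exact ⟨fun x h => h, by simp, by simp, fun x h => Or.inl h⟩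
  | cons i L ih =>
    intro v acc
    simp only [List.foldl_cons, pvInnerStep]
    by_cases hc : v.contains i = true
    · rw [if_pos hc]
      obtain ⟨ih2, ih3, ih4, ih5⟩ := ih v acc
      refine ⟨ih2, ?_, ?_, ?_⟩
      · intro j; rw [ih3]
        constructor
        · rintro (h | ⟨hm, hn⟩)
          · exact Or.inl h
          · exact Or.inr ⟨List.mem_cons_of_mem _ hm, hn⟩
        · rintro (h | ⟨hm, hn⟩)
          · exact Or.inl h
          · rcases List.mem_cons.mp hm with rfl | hm'
            · exact Or.inl hc
            · exact Or.inr ⟨hm', hn⟩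
      · intro j hj hvf hn
        rcases List.mem_cons.mp hj with rfl | hj'
        · exact absurd (hvf.symm.trans hc) (by simp)
        · exact ih4 j hj' hvf hn
      · intro x hx
        rcases ih5 x hx with h | ⟨j, hj, hg, hn⟩
        · exact Or.inl h
        · exact Or.inr ⟨j, List.mem_cons_of_mem _ hj, hg, hn⟩
    · rw [if_neg hc]
      have hcf : v.contains i = false := by revert hc; cases v.contains i <;> simp
      split
      · rename_i hnear
        obtain ⟨ih2, ih3, ih4, ih5⟩ := ih (v.add i) (acc ++ [pvG stores i])
        refine ⟨?_, ?_, ?_, ?_⟩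
        · intro x hx; exact ih2 x (by simp [hx])
        · intro j; rw [ih3, pvContains_add]
          constructor
          · rintro ((h | rfl) | ⟨hm, hn⟩)
            · exact Or.inl h
            · exact Or.inr ⟨by simp, hnear⟩
            · exact Or.inr ⟨List.mem_cons_of_mem _ hm, hn⟩
          · rintro (h | ⟨hm, hn⟩)
            · exact Or.inl (Or.inl h)
            · rcases List.mem_cons.mp hm with rfl | hm'
              · exact Or.inl (Or.inr rfl)
              · exact Or.inr ⟨hm', hn⟩
        · intro j hj hvf hn
          rcases List.mem_cons.mp hj with rfl | hj'
          · exact ih2 _ (by simp)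
          · by_cases hji : j = i
            · subst hji; exact ih2 _ (by simp)
            · have hadd : (v.add i).contains j = false := by
                cases h2 : (v.add i).contains j
                · rfl
                · rcases (pvContains_add v i j).mp h2 with h3 | h3
                  · exact absurd (hvf.symm.trans h3) (by simp)
                  · exact absurd h3 hji
              exact ih4 j hj' hadd hn
        · intro x hx
          rcases ih5 x hx with h | ⟨j, hj, hg, hn⟩
          · rcases List.mem_append.mp h with h' | h'
            · exact Or.inl h'
            · refine Or.inr ⟨i, by simp, ?_, hnear⟩
              simpa using (List.mem_singleton.mp h').symm
          · exact Or.inr ⟨j, List.mem_cons_of_mem _ hj, hg, hn⟩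
      · rename_i hnear
        obtain ⟨ih2, ih3, ih4, ih5⟩ := ih v acc
        refine ⟨ih2, ?_, ?_, ?_⟩
        · intro j; rw [ih3]
          constructor
          · rintro (h | ⟨hm, hn⟩)
            · exact Or.inl h
            · exact Or.inr ⟨List.mem_cons_of_mem _ hm, hn⟩
          · rintro (h | ⟨hm, hn⟩)
            · exact Or.inl h
            · rcases List.mem_cons.mp hm with rfl | hm'
              · exact absurd hn hnear
              · exact Or.inr ⟨hm', hn⟩
        · intro j hj hvf hn
          rcases List.mem_cons.mp hj with rfl | hj'
          · exact absurd hn hnear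
          · exact ih4 j hj' hvf hn
        · intro x hx
          rcases ih5 x hx with h | ⟨j, hj, hg, hn⟩
          · exact Or.inl h
          · exact Or.inr ⟨j, List.mem_cons_of_mem _ hj, hg, hn⟩

theorem pvBfs_total (n : Int) (stores : List (Int × Int)) (festival : Int × Int)
    (queue : List (Int × Int)) (visited : PySem.Set Int) :
    pvBfs n stores festival queue visited = "happy" ∨ pvBfs n stores festival queue visited = "sad" := by
  induction queue, visited using pvBfs.induct n stores festival with
  | case1 v => right; rw [pvBfs]
  | case2 cur rest visited h => left; rw [pvBfs]; simp [h]
  | case3 cur rest visited h st ih => rw [pvBfs]; simpa [h] using ih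

theorem pvBfs_happy (n : Int) (stores : List (Int × Int)) (festival house : Int × Int) :
    ∀ (queue : List (Int × Int)) (visited : PySem.Set Int),
      (∀ p ∈ queue, pvRF n stores [house] PySem.Set.empty p) →
      pvBfs n stores festival queue visited = "happy" →
      ∃ p, pvRF n stores [house] PySem.Set.empty p ∧ pvMd p festival ≤ 1000 := by
  intro queue visited
  induction queue, visited using pvBfs.induct n stores festival with
  | case1 v => intro _ h; rw [pvBfs] at h; simp at h
  | case2 cur rest visited hnear => intro hq _; exact ⟨cur, hq cur (by simp), hnear⟩
  | case3 cur rest visited hnear st ih =>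
    intro hq hres
    rw [pvBfs] at hres; simp only [if_neg hnear] at hres
    refine ih ?_ hres
    intro p hp
    rcases List.mem_append.mp hp with hp' | hp'
    · exact hq p (List.mem_cons_of_mem _ hp')
    · rcases ((pvInner_char stores cur (PySem.List.pyRange 0 n) visited []).2.2.2 p
          (by simpa [pvInner] using hp')) with h | ⟨j, hj, hg, hn⟩
      · simp at h
      · have hcur := hq cur (by simp)
        have hj' := PySem.List.mem_pyRange_one.mp hj
        exact hg ▸ pvRF.step cur j hcur hj'.1 hj'.2 rfl hn

theorem pvRF_transfer (n : Int) (stores : List (Int × Int)) (cur : Int × Int)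
    (rest : List (Int × Int)) (visited : PySem.Set Int) (p : Int × Int)
    (h : pvRF n stores (cur :: rest) visited p) :
    p = cur ∨ pvRF n stores (rest ++ (pvInner n stores cur visited).2) (pvInner n stores cur visited).1 p := by
  induction h with
  | base q hq =>
    rcases List.mem_cons.mp hq with rfl | hq'
    · exact Or.inl rfl
    · exact Or.inr (pvRF.base q (List.mem_append.mpr (Or.inl hq')))
  | step q i hql h0 hn hvf hnear ih =>
    right
    rcases ih with rfl | hq'
    · refine pvRF.base _ (List.mem_append.mpr (Or.inr ?_))
      have := (pvInner_char stores q (PySem.List.pyRange 0 n) visited []).2.2.1 i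
        (PySem.List.mem_pyRange_one.mpr ⟨h0, hn⟩) hvf hnear
      simpa [pvInner] using this
    · cases h2 : (pvInner n stores cur visited).1.contains i with
      | false => exact pvRF.step q i hq' h0 hn h2 hnear
      | true =>
        rcases ((pvInner_char stores cur (PySem.List.pyRange 0 n) visited []).2.1 i).mp
            (by simpa [pvInner] using h2) with hv | ⟨hmem, hnear'⟩
        · exact absurd (hvf.symm.trans hv) (by simp)
        · refine pvRF.base _ (List.mem_append.mpr (Or.inr ?_))
          have := (pvInner_char stores cur (PySem.List.pyRange 0 n) visited []).2.2.1 i hmem hvf hnear'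
          simpa [pvInner] using this

theorem pvBfs_sad (n : Int) (stores : List (Int × Int)) (festival : Int × Int) :
    ∀ (queue : List (Int × Int)) (visited : PySem.Set Int),
      pvBfs n stores festival queue visited = "sad" →
      ∀ p, pvRF n stores queue visited p → ¬(pvMd p festival ≤ 1000) := by
  intro queue visited
  induction queue, visited using pvBfs.induct n stores festival with
  | case1 v => intro _ p hp _; exact pvRF_nil _ _ _ _ hp
  | case2 cur rest visited hnear => intro hres; rw [pvBfs] at hres; simp [hnear] at hres
  | case3 cur rest visited hnear st ih =>
    intro hres p hp
    rw [pvBfs] at hres; simp only [if_neg hnear] at hres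
    rcases pvRF_transfer n stores cur rest visited p hp with rfl | hp'
    · exact hnear
    · exact ih hres p hp'

-- structural characterisation of one pass of B
theorem pvPass_char (rest : List (Int × Int)) :
    ∀ (pts acc : List (Int × Int)),
      (pts.length ≤ (rest.foldl pvPassStep (pts, acc)).1.length) ∧
      (∀ x ∈ pts, x ∈ (rest.foldl pvPassStep (pts, acc)).1) ∧
      (∀ x, (x ∈ pts ∨ x ∈ acc ∨ x ∈ rest) →
        (x ∈ (rest.foldl pvPassStep (pts, acc)).1 ∨ x ∈ (rest.foldl pvPassStep (pts, acc)).2)) ∧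
      ((rest.foldl pvPassStep (pts, acc)).1.length + (rest.foldl pvPassStep (pts, acc)).2.length
        = pts.length + acc.length + rest.length) ∧
      (∀ x ∈ (rest.foldl pvPassStep (pts, acc)).2,
        x ∈ acc ∨ ∀ q ∈ pts, ¬(pvMd x q ≤ 1000)) ∧
      ((rest.foldl pvPassStep (pts, acc)).1.length = pts.length →
        (rest.foldl pvPassStep (pts, acc)).1 = pts ∧ (rest.foldl pvPassStep (pts, acc)).2 = acc ++ rest) := by
  induction rest with
  | nil =>
    intro pts acc
    refine ⟨le_refl _, fun x h => h, ?_, by simp, fun x h => Or.inl h, fun _ => ⟨rfl, by simp⟩⟩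
    rintro x (h | h | h)
    · exact Or.inl h
    · exact Or.inr h
    · exact absurd h (by simp)
  | cons p rest ih =>
    intro pts acc
    simp only [List.foldl_cons, pvPassStep]
    split
    · rename_i hany
      obtain ⟨ih0, ih1, ih2, ih3, ih4, ih5⟩ := ih (pts ++ [p]) acc
      refine ⟨?_, ?_, ?_, ?_, ?_, ?_⟩
      · refine le_trans ?_ ih0
        simp
      · intro x hx; exact ih1 x (by simp [hx])
      · rintro x (h | h | h)
        · exact ih2 x (Or.inl (by simp [h]))
        · exact ih2 x (Or.inr (Or.inl h))
        · rcases List.mem_cons.mp h with rfl | h'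
          · exact ih2 x (Or.inl (by simp))
          · exact ih2 x (Or.inr (Or.inr h'))
      · simp only [List.length_append, List.length_cons, List.length_nil] at ih3 ⊢
        omega
      · intro x hx
        rcases ih4 x hx with h | h
        · exact Or.inl h
        · exact Or.inr (fun q hq => h q (by simp [hq]))
      · intro hlen
        exfalso
        simp only [List.length_append, List.length_cons, List.length_nil] at ih0
        omega
    · rename_i hany
      obtain ⟨ih0, ih1, ih2, ih3, ih4, ih5⟩ := ih pts (acc ++ [p])
      refine ⟨ih0, ih1, ?_, ?_, ?_, ?_⟩
      · rintro x (h | h | h)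
        · exact ih2 x (Or.inl h)
        · exact ih2 x (Or.inr (Or.inl (by simp [h])))
        · rcases List.mem_cons.mp h with rfl | h'
          · exact ih2 x (Or.inr (Or.inl (by simp)))
          · exact ih2 x (Or.inr (Or.inr h'))
      · simp only [List.length_append, List.length_cons, List.length_nil] at ih3 ⊢
        omega
      · intro x hx
        rcases ih4 x hx with h | h
        · rcases List.mem_append.mp h with h' | h'
          · exact Or.inl h'
          · right
            have hxp := List.mem_singleton.mp h'
            subst hxp
            intro q hq hle
            exact hany (by simp only [List.any_eq_true]; exact ⟨q, hq, by simpa using hle⟩)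
        · exact Or.inr h
      · intro hlen
        obtain ⟨e1, e2⟩ := ih5 hlen
        exact ⟨e1, by rw [e2, List.append_assoc]; rfl⟩

-- soundness of one pass of B w.r.t. reachability
theorem pvPass_sound (n : Int) (stores : List (Int × Int)) (house : Int × Int)
    (rest : List (Int × Int)) :
    ∀ (pts acc : List (Int × Int)),
      (∀ x ∈ pts, pvRF n stores [house] PySem.Set.empty x) →
      (∀ x ∈ acc, ∃ i, 0 ≤ i ∧ i < n ∧ pvG stores i = x) →
      (∀ x ∈ rest, ∃ i, 0 ≤ i ∧ i < n ∧ pvG stores i = x) →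
      (∀ x ∈ (rest.foldl pvPassStep (pts, acc)).1, pvRF n stores [house] PySem.Set.empty x) ∧
      (∀ x ∈ (rest.foldl pvPassStep (pts, acc)).2, ∃ i, 0 ≤ i ∧ i < n ∧ pvG stores i = x) := by
  induction rest with
  | nil => intro pts acc h1 h2 _; exact ⟨h1, h2⟩
  | cons p rest ih =>
    intro pts acc h1 h2 h3
    simp only [List.foldl_cons, pvPassStep]
    split
    · rename_i hany
      refine ih (pts ++ [p]) acc ?_ h2 (fun x hx => h3 x (by simp [hx]))
      intro x hx
      rcases List.mem_append.mp hx with h' | h'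
      · exact h1 x h'
      · have hxp := List.mem_singleton.mp h'
        subst hxp
        rcases List.any_eq_true.mp hany with ⟨q, hq, hle⟩
        obtain ⟨i, hi0, hin, hgi⟩ := h3 x (by simp)
        have hnear : pvMd q (pvG stores i) ≤ 1000 := by
          rw [hgi, ← pvMd_comm]
          simpa using hle
        exact hgi ▸ pvRF.step q i (h1 q hq) hi0 hin rfl hnear
    · rename_i hany
      refine ih pts (acc ++ [p]) h1 ?_ (fun x hx => h3 x (by simp [hx]))
      intro x hx
      rcases List.mem_append.mp hx with h' | h'
      · exact h2 x h'
      · exact (List.mem_singleton.mp h') ▸ h3 p (by simp)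

theorem pvSat_mono (pts rest : List (Int × Int)) : ∀ x ∈ pts, x ∈ pvSat pts rest := by
  induction pts, rest using pvSat.induct with
  | case1 pts rest st heq =>
    simp only [st] at heq
    intro x hx
    rw [pvSat]
    simp only [if_pos heq]
    exact (pvPass_char rest pts []).2.1 x hx
  | case2 pts rest st heq ih =>
    simp only [st] at heq
    intro x hx
    rw [pvSat]
    simp only [if_neg heq]
    exact ih x ((pvPass_char rest pts []).2.1 x hx)

theorem pvSat_sound (n : Int) (stores : List (Int × Int)) (house : Int × Int) :
    ∀ (pts rest : List (Int × Int)),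
      (∀ x ∈ pts, pvRF n stores [house] PySem.Set.empty x) →
      (∀ x ∈ rest, ∃ i, 0 ≤ i ∧ i < n ∧ pvG stores i = x) →
      ∀ x ∈ pvSat pts rest, pvRF n stores [house] PySem.Set.empty x := by
  intro pts rest
  induction pts, rest using pvSat.induct with
  | case1 pts rest st heq =>
    simp only [st] at heq
    intro h1 h3 x hx
    rw [pvSat] at hx
    simp only [if_pos heq] at hx
    exact (pvPass_sound n stores house rest pts [] h1 (by simp) h3).1 x hx
  | case2 pts rest st heq ih =>
    simp only [st] at heq
    intro h1 h3 x hx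
    rw [pvSat] at hx
    simp only [if_neg heq] at hx
    have hs := pvPass_sound n stores house rest pts [] h1 (by simp) h3
    exact ih hs.1 hs.2 x hx

theorem pvSat_complete (n : Int) (stores : List (Int × Int)) (house : Int × Int) :
    ∀ (pts rest : List (Int × Int)),
      house ∈ pts →
      (∀ x, pvRF n stores [house] PySem.Set.empty x → x ∈ pts ∨ x ∈ rest) →
      ∀ x, pvRF n stores [house] PySem.Set.empty x → x ∈ pvSat pts rest := by
  intro pts rest
  induction pts, rest using pvSat.induct with
  | case1 pts rest st heq =>
    simp only [st] at heq
    intro hh hcov x hx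
    rw [pvSat]
    simp only [if_pos heq]
    obtain ⟨c0, c1, c2, c3, c4, c5⟩ := pvPass_char rest pts []
    have hlen : (rest.foldl pvPassStep (pts, [])).1.length = pts.length := by
      have h2 : (pvPass pts rest).2.length = rest.length := heq
      simp only [pvPass] at h2
      simp only [List.length_nil] at c3
      omega
    obtain ⟨e1, e2⟩ := c5 hlen
    have goal : ∀ y, pvRF n stores [house] PySem.Set.empty y → y ∈ pts := by
      intro y hy
      induction hy with
      | base z hz => exact (List.mem_singleton.mp hz) ▸ hh
      | step q i hq hi0 hin hvf hnear ihq =>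
        rcases hcov _ (pvRF.step q i hq hi0 hin hvf hnear) with h | h
        · exact h
        · rcases c4 _ (by rw [e2]; simpa using h) with h' | h'
          · exact absurd h' (by simp)
          · exact absurd (by rw [pvMd_comm]; exact hnear) (h' q ihq)
    show x ∈ (pvPass pts rest).1
    simp only [pvPass, e1]
    exact goal x hx
  | case2 pts rest st heq ih =>
    simp only [st] at heq
    intro hh hcov x hx
    rw [pvSat]
    simp only [if_neg heq]
    obtain ⟨c0, c1, c2, c3, c4, c5⟩ := pvPass_char rest pts []
    refine ih (c1 house hh) ?_ x hx
    intro y hy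
    rcases hcov y hy with h | h
    · exact c2 y (Or.inl h)
    · exact c2 y (Or.inr (Or.inr h))

theorem pvG_eq (stores : List (Int × Int)) (i : Int) (h0 : 0 ≤ i) (hl : i.toNat < stores.length) :
    pvG stores i = stores[i.toNat] := by
  rw [pvG, PySem.List.pyGetD_of_nonneg stores (0, 0) h0]
  exact List.getD_eq_getElem stores (0, 0) hl

-- ===== VERDICT (by name: the statement is the Claim_ definition above) =====
theorem can_reach_festival_spec : Claim_equal_can_reach_festival := by
  intro n house stores festival _ hPre
  unfold Spec_can_reach_festival can_reach_festival can_reach_festival_alt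
  by_cases hnear : pvMd house festival ≤ 1000
  · have hA : pvBfs n stores festival [house] PySem.Set.empty = "happy" := by
      rw [pvBfs]; simp [hnear]
    rw [hA]
    have hmem : house ∈ pvSat [house] (PySem.List.slice stores none (some (max n 0))) :=
      pvSat_mono _ _ house (by simp)
    have hany : (pvSat [house] (PySem.List.slice stores none (some (max n 0)))).any
        (fun p => pvMd p festival ≤ 1000) = true := by
      simp only [List.any_eq_true]
      exact ⟨house, hmem, by simpa using hnear⟩
    simp [hany]
  · have hn : n ≤ (stores.length : Int) := by
      rcases hPre with h | h
      · exact h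
      · exact absurd (show pvMd house festival ≤ 1000 by simpa [pvMd] using h) hnear
    have hL : PySem.List.slice stores none (some (max n 0)) = stores.take (max n 0).toNat :=
      PySem.List.slice_to stores (le_max_right _ _)
    have hidx : ∀ x ∈ PySem.List.slice stores none (some (max n 0)),
        ∃ i, 0 ≤ i ∧ i < n ∧ pvG stores i = x := by
      intro x hx
      rw [hL] at hx
      obtain ⟨j, hj, hxe⟩ := List.mem_iff_getElem.mp hx
      have hjb : j < (max n 0).toNat ∧ j < stores.length := by
        simp only [List.length_take, lt_min_iff] at hj
        exact hj
      refine ⟨(j : Int), Int.natCast_nonneg j, by omega, ?_⟩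
      have hg : pvG stores (j : Int) = stores[((j : Int)).toNat] :=
        pvG_eq stores (j : Int) (Int.natCast_nonneg j) (by simpa using hjb.2)
      rw [hg, ← hxe]
      simp [List.getElem_take]
    have hcov : ∀ x, pvRF n stores [house] PySem.Set.empty x →
        x ∈ [house] ∨ x ∈ PySem.List.slice stores none (some (max n 0)) := by
      intro x hx
      induction hx with
      | base z hz => exact Or.inl hz
      | step q i hq hi0 hin hvf hne ihq =>
        right
        rw [hL]
        have hil : i.toNat < stores.length := by omega
        have him : i.toNat < (max n 0).toNat := by omega
        rw [pvG_eq stores i hi0 hil]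
        have he : (stores.take (max n 0).toNat)[i.toNat]'(by simp [List.length_take]; omega)
            = stores[i.toNat] := List.getElem_take
        rw [← he]
        exact List.getElem_mem _
    rcases pvBfs_total n stores festival [house] PySem.Set.empty with hA | hA
    · rw [hA]
      obtain ⟨p, hp, hpn⟩ := pvBfs_happy n stores festival house [house] PySem.Set.empty
        (fun q hq => pvRF.base q hq) hA
      have hmem := pvSat_complete n stores house [house]
        (PySem.List.slice stores none (some (max n 0))) (by simp) hcov p hp
      have hany : (pvSat [house] (PySem.List.slice stores none (some (max n 0)))).any
          (fun q => pvMd q festival ≤ 1000) = true := by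
        simp only [List.any_eq_true]
        exact ⟨p, hmem, by simpa using hpn⟩
      simp [hany]
    · rw [hA]
      have hnone := pvBfs_sad n stores festival [house] PySem.Set.empty hA
      have hany : (pvSat [house] (PySem.List.slice stores none (some (max n 0)))).any
          (fun q => pvMd q festival ≤ 1000) = false := by
        rw [List.any_eq_false]
        intro p hp
        have := hnone p (pvSat_sound n stores house [house]
          (PySem.List.slice stores none (some (max n 0)))
          (fun y hy => pvRF.base y hy) hidx p hp)
        simpa using this
      simp [hany]
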